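-- pv_equiv track=rewrite | github.com/bigluck07/All_night_study | 알고리즘/codestate_algoStudy/모고1_2번_가장많이방문한페이지_lv1.py | solution
-- ===== SOURCE A (Python) =====
-- from collections import deque
--
-- def solution(s):
--     answer = 0
--     s = s.split()
--     front = deque()
--     back = deque()
--     now = ''
--     cnt = {}
--     for i in s:
--         if i == 'B':
--             if len(back) > 0:
--                 front.append(now)
--                 now = back.pop()
--                 cnt[now]+=1
--         elif i == 'F':
--             if len(front) > 0:
--                 back.append(now)
--                 now = front.pop()
--                 cnt[now]+=1
--         else:
--             front = deque()
--             if i in cnt: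
--                 back.append(now)
--                 now = i
--                 cnt[now]+=1
--             else:
--                 if now != '':
--                     back.append(now)
--                     now = i
--                     cnt[now]=1
--                 else:
--                     now = i
--                     cnt[now]=1
--     cnt = sorted(cnt.items(), key=lambda x: x[1], reverse=True)
--     answer = cnt[0][1]
--     return answer
-- ===== SOURCE B (Python) =====
-- from collections import Counter
--
-- def solution(s):
--     # Single-list browser model: one `pages` list plus an integer cursor `pos`
--     # (no back/forward stacks). 'B'/'F' just move the cursor; a new URL cuts
--     # off the forward part and appends. Visits are tallied once at the end.
--     pages = []
--     pos = -1          # index of the current page; -1 = no page yet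
--     visits = []
--     for tok in s.split():
--         if tok == 'B':
--             if pos > 0:
--                 pos -= 1
--                 visits.append(pages[pos])
--         elif tok == 'F':
--             if pos < len(pages) - 1:
--                 pos += 1
--                 visits.append(pages[pos])
--         else:
--             del pages[pos + 1:]
--             pages.append(tok)
--             pos += 1
--             visits.append(tok)
--     return max(Counter(visits).values())
-- ===== Notes on version B (the rewrite author's own statement) =====
-- stated objective: alternative
-- what changed: B replaces A's two back/forward stacks and incrementally-maintained count dict with a single pages list plus an integer cursor (B/F move the cursor, a URL truncates the forward part and appends), recording visits in a list that is tallied once at the end with collections.Counter.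
-- outside the precondition, e.g. on solution('B'): A raises IndexError, B raises ValueError; on solution('F'): A raises IndexError, B raises ValueError
import Mathlib
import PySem

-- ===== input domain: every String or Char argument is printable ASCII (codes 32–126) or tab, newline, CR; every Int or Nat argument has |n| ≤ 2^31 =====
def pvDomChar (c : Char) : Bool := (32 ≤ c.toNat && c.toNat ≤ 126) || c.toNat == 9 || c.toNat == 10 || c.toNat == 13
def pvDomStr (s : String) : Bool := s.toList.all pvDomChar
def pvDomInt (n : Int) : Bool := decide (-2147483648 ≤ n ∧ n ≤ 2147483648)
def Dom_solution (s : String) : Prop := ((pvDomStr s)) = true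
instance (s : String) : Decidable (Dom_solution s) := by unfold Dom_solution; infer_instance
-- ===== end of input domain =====

-- B replaces A's two back/forward stacks and incrementally-maintained count dict with a
-- single pages list plus an integer cursor; visits are tallied once at the end.

-- ===== PORT A =====
-- one step of A's for-loop; state = (front, back, now, cnt); deque append = append at the
-- right end, deque pop = remove the last element (getLast?/dropLast).
-- cnt[now] += 1 is ported as Dict.modify now 0 (·+1): at every point A executes it the key
-- is already present (pages are counted before they are pushed on a stack), so the default
-- 0 is never used on an input where the Python returns.
def solutionStepA (st : List String × List String × String × PySem.Dict String Int)
    (i : String) : List String × List String × String × PySem.Dict String Int :=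
  let (front, back, now, cnt) := st
  if i = "B" then
    if back.length > 0 then
      let now' := (back.getLast?).getD ""
      (front ++ [now], back.dropLast, now', cnt.modify now' 0 (· + 1))
    else st
  else if i = "F" then
    if front.length > 0 then
      let now' := (front.getLast?).getD ""
      (front.dropLast, back ++ [now], now', cnt.modify now' 0 (· + 1))
    else st
  else
    if cnt.contains i then
      (([] : List String), back ++ [now], i, cnt.modify i 0 (· + 1))
    else if now ≠ "" then
      (([] : List String), back ++ [now], i, cnt.insert i 1)
    else
      (([] : List String), back, i, cnt.insert i 1)

def solution (s : String) : Int :=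
  let toks := PySem.Str.split₀ s
  let st := toks.foldl solutionStepA ([], [], "", PySem.Dict.empty)
  let cntSorted := PySem.List.sorted st.2.2.2.items (fun x => x.2) true
  -- answer = cnt[0][1]; Python raises IndexError on an empty list (excluded by Pre_)
  match cntSorted with
  | [] => 0
  | p :: _ => p.2

-- ===== PORT B =====
-- one step of B's for-loop; state = (pages, pos, visits).
-- pages[pos] is ported as (pyGet? …).getD "": in B's own code the cursor is in range at
-- every access (guarded by pos > 0 / pos < len-1), so the default never fires.
-- del pages[pos+1:] followed by append(tok) is slice-to (pos+1) ++ [tok].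
def solutionStepB (st : List String × Int × List String)
    (tok : String) : List String × Int × List String :=
  let (pages, pos, visits) := st
  if tok = "B" then
    if pos > 0 then
      (pages, pos - 1, visits ++ [(PySem.List.pyGet? pages (pos - 1)).getD ""])
    else st
  else if tok = "F" then
    if pos < (pages.length : Int) - 1 then
      (pages, pos + 1, visits ++ [(PySem.List.pyGet? pages (pos + 1)).getD ""])
    else st
  else
    (PySem.List.slice pages none (some (pos + 1)) ++ [tok], pos + 1, visits ++ [tok])

def solution_alt (s : String) : Int :=
  let st := (PySem.Str.split₀ s).foldl solutionStepB ([], -1, [])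
  -- max(Counter(visits).values()); Python raises ValueError on empty (excluded by Pre_)
  match PySem.List.max? (PySem.Dict.counter st.2.2).values (fun v => v) with
  | some m => m
  | none => 0

-- ===== PRECONDITION & SPEC =====
-- Pre_ excludes exactly the inputs whose whitespace-split has no token other than 'B'/'F':
-- there A's cnt stays empty and cnt[0][1] raises IndexError (B's max raises ValueError too).
def Pre_solution (s : String) : Prop :=
  ∃ t ∈ PySem.Str.split₀ s, t ≠ "B" ∧ t ≠ "F"
instance (s : String) : Decidable (Pre_solution s) := by unfold Pre_solution; infer_instance

def pvWitness_solution : String := "google.com B naver.com B B F"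

def Spec_solution (s : String) (out : Int) : Prop := out = solution_alt s
instance (s : String) (out : Int) : Decidable (Spec_solution s out) := by unfold Spec_solution; infer_instance

-- ===== CLAIM (what is proved, stated in full; the proofs are below) =====
def Claim_equal_solution : Prop := ∀ (s : String), Dom_solution s → Pre_solution s → Spec_solution s (solution s)

-- ===== LEMMAS AND PROOFS =====

-- tokens produced by str.split() are never empty
lemma split0_go_ne_nil (cs : List Char) :
    ∀ cur acc, (∀ t ∈ acc, t ≠ []) →
      ∀ t ∈ PySem.Chars.split₀.go cs cur acc, t ≠ [] := by
  induction cs with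
  | nil =>
    intro cur acc hacc t ht
    simp only [PySem.Chars.split₀.go] at ht
    split at ht
    · exact hacc t (by simpa using ht)
    · rename_i hcur
      simp only [Bool.not_eq_true, List.isEmpty_eq_false_iff] at hcur
      have hm : t ∈ acc ∨ t = cur.reverse := by simpa using ht
      rcases hm with hm | rfl
      · exact hacc t hm
      · simpa using hcur
  | cons c rest ih =>
    intro cur acc hacc t ht
    simp only [PySem.Chars.split₀.go] at ht
    split at ht
    · split at ht
      · exact ih [] acc hacc t ht
      · rename_i hcur
        simp only [Bool.not_eq_true, List.isEmpty_eq_false_iff] at hcur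
        refine ih [] (cur.reverse :: acc) ?_ t ht
        intro u hu
        rcases List.mem_cons.mp hu with rfl | hu1
        · simpa using hcur
        · exact hacc u hu1
    · exact ih (c :: cur) acc hacc t ht

lemma split0_tok_ne_empty (s : String) : ∀ t ∈ PySem.Str.split₀ s, t ≠ "" := by
  intro t ht
  simp only [PySem.Str.split₀, List.mem_map] at ht
  obtain ⟨u, hu, rfl⟩ := ht
  have hne : u ≠ [] := split0_go_ne_nil s.toList [] [] (by simp) u hu
  intro h
  apply hne
  have := congrArg String.toList h
  simpa using this

-- correspondence between A's state and B's state: B's pages list is back ++ [now] ++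
-- reversed front, the cursor sits on `now`, and A's cnt is the Counter of B's visit list.
def SimRel (f b : List String) (n : String) (cnt : PySem.Dict String Int)
    (pages : List String) (pos : Int) (visits : List String) : Prop :=
  cnt = PySem.Dict.counter visits ∧
  ((n = "" ∧ f = [] ∧ b = [] ∧ visits = [] ∧ pages = [] ∧ pos = -1) ∨
   (n ≠ "" ∧ pages = b ++ [n] ++ f.reverse ∧ pos = (b.length : Int) ∧ "" ∉ f ∧ "" ∉ b))

-- A's URL-branch update of cnt is Counter (visits ++ [i]) in every branch
lemma counter_snoc_cases (h : List String) (i : String) :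
    (if (PySem.Dict.counter h).contains i then (PySem.Dict.counter h).modify i 0 (· + 1)
     else (PySem.Dict.counter h).insert i 1) = PySem.Dict.counter (h ++ [i]) := by
  by_cases hc : i ∈ h
  · have : (PySem.Dict.counter h).contains i = true := by
      simp [PySem.Dict.contains_counter, hc]
    rw [if_pos this, PySem.Dict.counter_append_singleton]
  · have : (PySem.Dict.counter h).contains i = false := by
      simp [PySem.Dict.contains_counter, hc]
    rw [if_neg (by simp [this]), PySem.Dict.counter_append_singleton]
    simp [PySem.Dict.modify, PySem.Dict.getD_counter, List.count_eq_zero_of_not_mem hc]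

-- one step preserves the correspondence
lemma step_rel (tok : String) (htok : tok ≠ "")
    (f b : List String) (n : String) (cnt : PySem.Dict String Int)
    (pages : List String) (pos : Int) (visits : List String)
    (h : SimRel f b n cnt pages pos visits) :
    SimRel (solutionStepA (f, b, n, cnt) tok).1 (solutionStepA (f, b, n, cnt) tok).2.1
        (solutionStepA (f, b, n, cnt) tok).2.2.1 (solutionStepA (f, b, n, cnt) tok).2.2.2
        (solutionStepB (pages, pos, visits) tok).1 (solutionStepB (pages, pos, visits) tok).2.1
        (solutionStepB (pages, pos, visits) tok).2.2 := by
  obtain ⟨hcnt, hcase⟩ := h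
  subst hcnt
  by_cases hB : tok = "B"
  · subst hB
    rcases hcase with ⟨hn, hf, hb, hv, hp, hpos⟩ | ⟨hn, hp, hpos, hf, hb⟩
    · subst hf; subst hb; subst hv; subst hp; subst hpos
      simp [solutionStepA, solutionStepB, SimRel, hn]
    · by_cases hbe : b = []
      · subst hbe
        simp only [hpos, List.length_nil, Nat.cast_zero] at *
        simp [solutionStepA, solutionStepB, SimRel, hn, hp, hf, hb]
      · have hlen : 0 < b.length := List.length_pos_of_ne_nil hbe
        have hposgt : pos > 0 := by rw [hpos]; exact_mod_cast hlen
        have hidx : pos - 1 = ((b.dropLast.length : Nat) : Int) := by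
          rw [hpos, List.length_dropLast]; omega
        have hsplit : pages = b.dropLast ++ (b.getLast hbe :: ([n] ++ f.reverse)) := by
          rw [hp]
          have hassoc : b.dropLast ++ (b.getLast hbe :: ([n] ++ f.reverse)) =
              (b.dropLast ++ [b.getLast hbe]) ++ ([n] ++ f.reverse) := by simp
          rw [hassoc, List.dropLast_append_getLast hbe, List.append_assoc]
        have hget : PySem.List.pyGet? pages (pos - 1) = some (b.getLast hbe) := by
          rw [hidx, hsplit]
          exact PySem.List.pyGet?_append_length ..
        have hgl : b.getLast? = some (b.getLast hbe) := List.getLast?_eq_some_getLast hbe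
        have hstepA : solutionStepA (f, b, n, PySem.Dict.counter visits) "B" =
            (f ++ [n], b.dropLast, b.getLast hbe,
              (PySem.Dict.counter visits).modify (b.getLast hbe) 0 (· + 1)) := by
          simp [solutionStepA, hlen, hgl]
        have hstepB : solutionStepB (pages, pos, visits) "B" =
            (pages, pos - 1, visits ++ [b.getLast hbe]) := by
          simp [solutionStepB, hposgt, hget]
        rw [hstepA, hstepB]
        refine ⟨(PySem.Dict.counter_append_singleton ..).symm, Or.inr ⟨?_, ?_, ?_, ?_, ?_⟩⟩
        · intro he; exact hb (he ▸ List.getLast_mem hbe)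
        · rw [hp, List.dropLast_append_getLast hbe]
          simp
        · rw [hidx]
        · simp only [List.mem_append, List.mem_singleton]
          rintro (hm | rfl)
          · exact hf hm
          · exact hn rfl
        · exact fun hm => hb (List.Sublist.mem hm (List.dropLast_sublist b))
  · by_cases hF : tok = "F"
    · subst hF
      rcases hcase with ⟨hn, hf, hb, hv, hp, hpos⟩ | ⟨hn, hp, hpos, hf, hb⟩
      · subst hf; subst hb; subst hv; subst hp; subst hpos
        simp [solutionStepA, solutionStepB, SimRel, hn]
      · have hplen : (pages.length : Int) = (b.length : Int) + 1 + f.length := by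
          rw [hp]; simp; ring
        by_cases hfe : f = []
        · subst hfe
          have hcond : ¬ (pos < (pages.length : Int) - 1) := by
            rw [hpos, hplen]; simp
          simp only [solutionStepA, solutionStepB, List.length_nil, gt_iff_lt,
            Nat.lt_irrefl, if_false, if_neg hcond]
          simp [SimRel, hn, hp, hpos, hf, hb]
        · have hlen : 0 < f.length := List.length_pos_of_ne_nil hfe
          have hcond : pos < (pages.length : Int) - 1 := by
            rw [hpos, hplen]; omega
          have hrev : f.reverse = f.getLast hfe :: f.dropLast.reverse := by
            have h1 := congrArg List.reverse (List.dropLast_append_getLast hfe)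
            simpa using h1.symm
          have hidx : pos + 1 = (((b ++ [n]).length : Nat) : Int) := by
            rw [hpos]; simp
          have hsplit : pages = (b ++ [n]) ++ (f.getLast hfe :: f.dropLast.reverse) := by
            rw [hp, List.append_assoc]
            rw [hrev]
            simp
          have hget : PySem.List.pyGet? pages (pos + 1) = some (f.getLast hfe) := by
            rw [hidx, hsplit]
            exact PySem.List.pyGet?_append_length ..
          have hgl : f.getLast? = some (f.getLast hfe) := List.getLast?_eq_some_getLast hfe
          have hstepA : solutionStepA (f, b, n, PySem.Dict.counter visits) "F" =
              (f.dropLast, b ++ [n], f.getLast hfe,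
                (PySem.Dict.counter visits).modify (f.getLast hfe) 0 (· + 1)) := by
            simp [solutionStepA, hlen, hgl]
          have hstepB : solutionStepB (pages, pos, visits) "F" =
              (pages, pos + 1, visits ++ [f.getLast hfe]) := by
            simp [solutionStepB, hcond, hget]
          rw [hstepA, hstepB]
          refine ⟨(PySem.Dict.counter_append_singleton ..).symm, Or.inr ⟨?_, ?_, ?_, ?_, ?_⟩⟩
          · intro he; exact hf (he ▸ List.getLast_mem hfe)
          · rw [hsplit]; simp
          · rw [hidx]
          · exact fun hm => hf (List.Sublist.mem hm (List.dropLast_sublist f))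
          · simp only [List.mem_append, List.mem_singleton]
            rintro (hm | rfl)
            · exact hb hm
            · exact hn rfl
    · -- URL token
      have hstepB : solutionStepB (pages, pos, visits) tok =
          (PySem.List.slice pages none (some (pos + 1)) ++ [tok], pos + 1,
            visits ++ [tok]) := by
        simp [solutionStepB, hB, hF]
      have hcntA : (solutionStepA (f, b, n, PySem.Dict.counter visits) tok).2.2.2 =
          PySem.Dict.counter (visits ++ [tok]) := by
        rw [← counter_snoc_cases visits tok]
        simp only [solutionStepA, hB, hF, if_false]
        split_ifs <;> rfl
      rcases hcase with ⟨hn, hf, hb, hv, hp, hpos⟩ | ⟨hn, hp, hpos, hf, hb⟩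
      · subst hf; subst hb; subst hv; subst hp; subst hpos
        have hcont : (PySem.Dict.counter ([] : List String)).contains tok = false := by
          simp [PySem.Dict.contains_counter]
        have hstepA : solutionStepA ([], [], n, PySem.Dict.counter ([] : List String)) tok =
            (([] : List String), ([] : List String), tok,
              (PySem.Dict.counter ([] : List String)).insert tok 1) := by
          simp [solutionStepA, hB, hF, hcont, hn]
        rw [hstepA, hstepB]
        refine ⟨?_, Or.inr ⟨htok, ?_, by simp, by simp, by simp⟩⟩
        · have := counter_snoc_cases ([] : List String) tok
          rw [if_neg (by simp [hcont])] at this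
          simpa using this
        · simp [PySem.List.slice]
      · have hstepA1 : (solutionStepA (f, b, n, PySem.Dict.counter visits) tok).1 = [] := by
          simp only [solutionStepA, hB, hF, if_false]
          split_ifs <;> rfl
        have hstepA2 : (solutionStepA (f, b, n, PySem.Dict.counter visits) tok).2.1 =
            b ++ [n] := by
          simp only [solutionStepA, hB, hF, if_false]
          split_ifs
          · rfl
          · rfl
        have hstepA3 : (solutionStepA (f, b, n, PySem.Dict.counter visits) tok).2.2.1 = tok := by
          simp only [solutionStepA, hB, hF, if_false]
          split_ifs <;> rfl
        have hslice : PySem.List.slice pages none (some (pos + 1)) = b ++ [n] := by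
          rw [PySem.List.slice_to pages (by omega : (0:Int) ≤ pos + 1), hp, hpos]
          have h1 : ((b.length : Int) + 1).toNat = (b ++ [n]).length := by simp
          rw [h1, List.take_left]
        rw [hstepB]
        refine ⟨hcntA, Or.inr ⟨by rw [hstepA3]; exact htok, ?_, ?_, ?_, ?_⟩⟩
        · rw [hstepA1, hstepA2, hstepA3, hslice]; simp
        · rw [hstepA2, hpos]; push_cast; simp
        · rw [hstepA1]; simp
        · rw [hstepA2]
          simp only [List.mem_append, List.mem_singleton]
          rintro (hm | rfl)
          · exact hb hm
          · exact hn rfl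

-- the correspondence carried through the whole fold
lemma fold_rel (toks : List String) (hne : ∀ t ∈ toks, t ≠ "")
    (f b : List String) (n : String) (cnt : PySem.Dict String Int)
    (pages : List String) (pos : Int) (visits : List String)
    (h : SimRel f b n cnt pages pos visits) :
    SimRel (toks.foldl solutionStepA (f, b, n, cnt)).1
        (toks.foldl solutionStepA (f, b, n, cnt)).2.1
        (toks.foldl solutionStepA (f, b, n, cnt)).2.2.1
        (toks.foldl solutionStepA (f, b, n, cnt)).2.2.2
        (toks.foldl solutionStepB (pages, pos, visits)).1
        (toks.foldl solutionStepB (pages, pos, visits)).2.1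
        (toks.foldl solutionStepB (pages, pos, visits)).2.2 := by
  induction toks generalizing f b n cnt pages pos visits with
  | nil => exact h
  | cons t ts ih =>
    have h' := step_rel t (hne t List.mem_cons_self) f b n cnt pages pos visits h
    rw [List.foldl_cons, List.foldl_cons]
    have hne' : ∀ u ∈ ts, u ≠ "" := fun u hu => hne u (List.mem_cons_of_mem t hu)
    have := ih hne' (solutionStepA (f, b, n, cnt) t).1 (solutionStepA (f, b, n, cnt) t).2.1
      (solutionStepA (f, b, n, cnt) t).2.2.1 (solutionStepA (f, b, n, cnt) t).2.2.2
      (solutionStepB (pages, pos, visits) t).1 (solutionStepB (pages, pos, visits) t).2.1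
      (solutionStepB (pages, pos, visits) t).2.2 h'
    simpa using this

-- B's visit list is nonempty as soon as some token is a page (not 'B'/'F')
lemma visits_nonempty (toks : List String) :
    ∀ (pages : List String) (pos : Int) (visits : List String),
    ((∃ t ∈ toks, t ≠ "B" ∧ t ≠ "F") ∨ visits ≠ []) →
    (toks.foldl solutionStepB (pages, pos, visits)).2.2 ≠ [] := by
  induction toks with
  | nil =>
    intro pages pos visits h
    rcases h with ⟨t, ht, _⟩ | hh
    · exact absurd ht List.not_mem_nil
    · simpa using hh
  | cons t ts ih =>
    intro pages pos visits h
    rw [List.foldl_cons]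
    by_cases hB : t = "B"
    · subst hB
      by_cases hpos : pos > 0
      · rw [show solutionStepB (pages, pos, visits) "B" =
            (pages, pos - 1, visits ++ [(PySem.List.pyGet? pages (pos - 1)).getD ""]) by
            simp [solutionStepB, hpos]]
        refine ih _ _ _ (Or.inr (by simp))
      · rw [show solutionStepB (pages, pos, visits) "B" = (pages, pos, visits) by
            simp [solutionStepB, hpos]]
        refine ih _ _ _ ?_
        rcases h with ⟨u, hu, hne⟩ | hh
        · rcases List.mem_cons.mp hu with rfl | hu1
          · exact absurd rfl hne.1
          · exact Or.inl ⟨u, hu1, hne⟩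
        · exact Or.inr hh
    · by_cases hF : t = "F"
      · subst hF
        by_cases hpos : pos < (pages.length : Int) - 1
        · rw [show solutionStepB (pages, pos, visits) "F" =
              (pages, pos + 1, visits ++ [(PySem.List.pyGet? pages (pos + 1)).getD ""]) by
              simp [solutionStepB, hB, hpos]]
          refine ih _ _ _ (Or.inr (by simp))
        · rw [show solutionStepB (pages, pos, visits) "F" = (pages, pos, visits) by
              simp [solutionStepB, hB, hpos]]
          refine ih _ _ _ ?_
          rcases h with ⟨u, hu, hne⟩ | hh
          · rcases List.mem_cons.mp hu with rfl | hu1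
            · exact absurd rfl hne.2
            · exact Or.inl ⟨u, hu1, hne⟩
          · exact Or.inr hh
      · rw [show solutionStepB (pages, pos, visits) t =
            (PySem.List.slice pages none (some (pos + 1)) ++ [t], pos + 1, visits ++ [t]) by
            simp [solutionStepB, hB, hF]]
        exact ih _ _ _ (Or.inr (by simp))

-- final tally: head of the count-descending sort of Counter(v).items equals max of its values
lemma final_agree (hist : List String) (hh : hist ≠ []) :
    (match PySem.List.sorted (PySem.Dict.counter hist).items (fun x : String × Int => x.2) true with
      | [] => (0 : Int)
      | p :: _ => p.2) =
    (match PySem.List.max? (PySem.Dict.counter hist).values (fun v => v) with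
      | some m => m
      | none => 0) := by
  have hitems : (PySem.Dict.counter hist).items ≠ [] := by
    rw [PySem.Dict.items_counter]
    simp only [ne_eq, List.map_eq_nil_iff]
    intro hemp
    rcases List.exists_mem_of_ne_nil hist hh with ⟨x, hx⟩
    have hm : x ∈ PySem.Set.ofList hist := (PySem.Set.mem_ofList hist x).mpr hx
    rw [hemp] at hm
    exact absurd hm (List.not_mem_nil)
  have hvals : (PySem.Dict.counter hist).values = (PySem.Dict.counter hist).items.map (·.2) := rfl
  rcases hs : PySem.List.sorted (PySem.Dict.counter hist).items (fun x : String × Int => x.2) true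
    with _ | ⟨p, rest⟩
  · exact absurd ((PySem.List.sorted_eq_nil_iff _ _ _).mp hs) hitems
  rcases hm : PySem.List.max? (PySem.Dict.counter hist).values (fun v => v) with _ | m
  · have hv : (PySem.Dict.counter hist).values = [] := (PySem.List.max?_eq_none_iff _ _).mp hm
    rw [hvals, List.map_eq_nil_iff] at hv
    exact absurd hv hitems
  dsimp only
  have hpmem : p ∈ (PySem.Dict.counter hist).items :=
    (PySem.List.mem_sorted _ _ _ _).mp (hs ▸ List.mem_cons_self)
  have hp2 : p.2 ∈ (PySem.Dict.counter hist).values := by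
    rw [hvals]
    exact List.mem_map_of_mem hpmem
  have hle : p.2 ≤ m := PySem.List.max?_isMax hm _ hp2
  have hmmem : m ∈ (PySem.Dict.counter hist).values := PySem.List.max?_mem hm
  obtain ⟨q, hq, hqm⟩ : ∃ q ∈ (PySem.Dict.counter hist).items, q.2 = m := by
    rw [hvals] at hmmem
    simpa using hmmem
  have hge : q.2 ≤ p.2 := PySem.List.key_head_sorted_rev_ge _ _ hs q hq
  omega

-- ===== VERDICT (by name: the statement is the Claim_ definition above) =====
theorem solution_spec : Claim_equal_solution := by
  intro s _ hpre
  unfold Spec_solution solution solution_alt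
  dsimp only
  have hne := split0_tok_ne_empty s
  have h0 : SimRel [] [] "" PySem.Dict.empty [] (-1) [] := by
    exact ⟨rfl, Or.inl ⟨rfl, rfl, rfl, rfl, rfl, rfl⟩⟩
  have hrel := fold_rel (PySem.Str.split₀ s) hne [] [] "" PySem.Dict.empty [] (-1) [] h0
  obtain ⟨hcnt, _⟩ := hrel
  rw [hcnt]
  have hh : ((PySem.Str.split₀ s).foldl solutionStepB ([], -1, [])).2.2 ≠ [] :=
    visits_nonempty _ [] (-1) [] (Or.inl hpre)
  exact final_agree _ hh
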